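-- pv_equiv track=rewrite | github.com/ejmurray/python_workbook_solutions | chapter_002/e06_switch_list_items.py | transpose_strings
-- ===== SOURCE A (Python) =====
-- def transpose_strings(list_of_strings):
--     first_items = []
--     second_items = []
--     third_items = []
--     for item in list_of_strings:
--         out = item.split(" ")
--         first_items.append(out[0])
--         second_items.append(out[1])
--         third_items.append(out[2])
--     out_one = [" ".join(first_items)] + [" ".join(second_items)] + [" ".join(third_items)]
--
--     return out_one
-- ===== SOURCE B (Python) =====
-- def transpose_strings(list_of_strings):
--     # Column-by-column: for each of the three column indices, gather that
--     # column from every row and join it; three passes instead of one pass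
--     # filling three accumulator lists.
--     return [" ".join(s.split(" ")[i] for s in list_of_strings) for i in range(3)]
-- ===== Notes on version B (the rewrite author's own statement) =====
-- stated objective: simpler
-- what changed: Replaces the single pass that fills three accumulator lists with a column-indexed comprehension: for each i in range(3) it joins the i-th split field of every row, one pass per column.
import Mathlib
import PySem

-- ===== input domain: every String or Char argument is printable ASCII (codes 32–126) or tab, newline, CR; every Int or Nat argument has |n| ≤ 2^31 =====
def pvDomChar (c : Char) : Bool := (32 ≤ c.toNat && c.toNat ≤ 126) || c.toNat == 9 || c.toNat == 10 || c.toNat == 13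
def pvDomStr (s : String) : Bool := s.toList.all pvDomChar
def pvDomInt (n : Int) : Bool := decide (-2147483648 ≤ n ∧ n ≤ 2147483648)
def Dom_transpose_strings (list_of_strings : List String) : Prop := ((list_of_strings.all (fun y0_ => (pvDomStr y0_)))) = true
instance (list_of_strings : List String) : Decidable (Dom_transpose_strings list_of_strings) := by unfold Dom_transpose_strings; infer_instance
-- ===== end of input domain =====

-- B builds the result column by column (one joined row per column index) instead of
-- one pass filling three accumulator lists; objective: simpler.

-- ===== PORT A =====
-- item.split(" ") — sep is the nonempty literal " ", so split? is always some;
-- out[k] under Pre_ (3 ≤ fields) is in range, so pyGetD is exact there.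
def pvFields (s : String) : List String := (PySem.Str.split? s " ").getD []

def transpose_strings (list_of_strings : List String) : List String :=
  let st := list_of_strings.foldl
    (fun (acc : List String × List String × List String) item =>
      let out := pvFields item
      (acc.1 ++ [PySem.List.pyGetD out 0 ""],
       acc.2.1 ++ [PySem.List.pyGetD out 1 ""],
       acc.2.2 ++ [PySem.List.pyGetD out 2 ""]))
    (([] : List String), ([] : List String), ([] : List String))
  [PySem.Str.join " " st.1] ++ [PySem.Str.join " " st.2.1] ++ [PySem.Str.join " " st.2.2]

-- ===== PORT B =====
def transpose_strings_alt (list_of_strings : List String) : List String :=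
  (PySem.List.pyRange 0 3 1).map (fun i =>
    PySem.Str.join " "
      (list_of_strings.map (fun s => PySem.List.pyGetD (pvFields s) i "")))

-- ===== PRECONDITION & SPEC =====
-- Pre_ excludes exactly the inputs where some row splits into fewer than 3 fields:
-- there Python A raises IndexError (out[1] or out[2]).
def Pre_transpose_strings (list_of_strings : List String) : Prop :=
  ∀ s ∈ list_of_strings, 3 ≤ ((PySem.Str.split? s " ").getD []).length
instance (list_of_strings : List String) : Decidable (Pre_transpose_strings list_of_strings) := by
  unfold Pre_transpose_strings; infer_instance
def pvWitness_transpose_strings : List String := ["a b c", "d e f g"]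
def Spec_transpose_strings (list_of_strings : List String) (out : List String) : Prop := out = transpose_strings_alt list_of_strings
instance (list_of_strings : List String) (out : List String) : Decidable (Spec_transpose_strings list_of_strings out) := by unfold Spec_transpose_strings; infer_instance

-- ===== CLAIM (what is proved, stated in full; the proofs are below) =====
def Claim_equal_transpose_strings : Prop := ∀ (list_of_strings : List String), Dom_transpose_strings list_of_strings → Pre_transpose_strings list_of_strings → Spec_transpose_strings list_of_strings (transpose_strings list_of_strings)

-- ===== LEMMAS AND PROOFS =====

-- A's single pass with three accumulators appends, per row, the row's field i to list i.
theorem pv_foldA (xs : List String) (a b c : List String) :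
    xs.foldl (fun (acc : List String × List String × List String) item =>
      let out := pvFields item
      (acc.1 ++ [PySem.List.pyGetD out 0 ""],
       acc.2.1 ++ [PySem.List.pyGetD out 1 ""],
       acc.2.2 ++ [PySem.List.pyGetD out 2 ""])) (a, b, c)
    = (a ++ xs.map (fun s => PySem.List.pyGetD (pvFields s) 0 ""),
       b ++ xs.map (fun s => PySem.List.pyGetD (pvFields s) 1 ""),
       c ++ xs.map (fun s => PySem.List.pyGetD (pvFields s) 2 "")) := by
  induction xs generalizing a b c with
  | nil => simp
  | cons x xs ih => simp [List.foldl_cons, ih]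

-- ===== VERDICT (by name: the statement is the Claim_ definition above) =====
theorem transpose_strings_spec : Claim_equal_transpose_strings := by
  intro xs _ _
  unfold Spec_transpose_strings transpose_strings transpose_strings_alt
  rw [pv_foldA]
  simp [PySem.List.pyRange_one, List.range_succ]
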